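-- pv_equiv track=rewrite | github.com/viliusgudziunas/for-fun | pythonScripts/SoloLearn/Fisher Number/Fisher Number Bonus.py | fisher_number
-- ===== SOURCE A (Python) =====
-- def fisher_number(number):
--     number_cube = number ** 3
--     number_multipliers_product = 1
--     for i in range(2, number + 1):
--         if number % i == 0:
--             number_multipliers_product *= i
--     if number_cube == number_multipliers_product:
--         return True
--     else:
--         return False
-- ===== SOURCE B (Python) =====
-- def fisher_number(number):
--     # O(sqrt(n)): product of all divisors of n is n^(tau/2), so n^3 equals it
--     # exactly when tau(n) == 6 (for n >= 2); count divisors in pairs up to sqrt(n).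
--     if number <= 0:
--         return False
--     if number == 1:
--         return True
--     tau = 0
--     i = 1
--     while i * i <= number:
--         if number % i == 0:
--             tau += 1 if i * i == number else 2
--         i += 1
--     return tau == 6
-- ===== Notes on version B (the rewrite author's own statement) =====
-- stated objective: faster
-- what changed: Replaced the linear scan multiplying all divisors with a square-root-bounded paired divisor count: the product of all divisors of n is n to the half-tau, so the cube condition holds exactly when n has six divisors (or n equals one), and B counts divisors in pairs up to the square root.
import Mathlib
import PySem

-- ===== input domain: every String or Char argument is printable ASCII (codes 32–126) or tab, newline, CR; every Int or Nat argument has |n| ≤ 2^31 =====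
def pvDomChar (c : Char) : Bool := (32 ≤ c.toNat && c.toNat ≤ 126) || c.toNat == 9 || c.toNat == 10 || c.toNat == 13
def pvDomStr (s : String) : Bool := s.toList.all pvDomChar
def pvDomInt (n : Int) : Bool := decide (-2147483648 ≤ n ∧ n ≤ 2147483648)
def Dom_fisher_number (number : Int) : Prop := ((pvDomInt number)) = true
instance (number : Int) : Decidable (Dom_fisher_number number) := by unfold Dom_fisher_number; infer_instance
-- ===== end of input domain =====

-- B changes the algorithm: instead of multiplying every divisor in 2..n (O(n)) it counts
-- divisors in pairs up to √n (O(√n)) and compares the count with 6, since the product of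
-- all divisors of n is n^(τ/2). Return values agree with A on every Int.

-- ===== PORT A =====
def fisher_number (number : Int) : Bool :=
  let number_cube := number ^ 3
  let number_multipliers_product :=
    (PySem.List.pyRange 2 (number + 1) 1).foldl
      (fun acc i => if PySem.Int.mod number i == 0 then acc * i else acc) 1
  if number_cube = number_multipliers_product then true else false

-- ===== PORT B =====
-- the while loop of Source B; after the `number <= 0` guard the Python ints are positive,
-- so Nat arithmetic (%, *, ≤) computes exactly the Python values
def fisherLoop (n i tau : Nat) : Nat :=
  if h : i * i ≤ n then
    if n % i = 0 then
      fisherLoop n (i + 1) (tau + (if i * i = n then 1 else 2))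
    else
      fisherLoop n (i + 1) tau
  else tau
termination_by n + 1 - i
decreasing_by
  all_goals
    rcases Nat.eq_zero_or_pos i with hi | hi
    · omega
    · have : i ≤ i * i := Nat.le_mul_of_pos_left i hi
      omega

def fisher_number_alt (number : Int) : Bool :=
  if number ≤ 0 then false
  else if number = 1 then true
  else decide (fisherLoop number.toNat 1 0 = 6)

-- ===== PRECONDITION & SPEC =====
def Spec_fisher_number (number : Int) (out : Bool) : Prop := out = fisher_number_alt number
instance (number : Int) (out : Bool) : Decidable (Spec_fisher_number number out) := by unfold Spec_fisher_number; infer_instance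

-- ===== CLAIM (what is proved, stated in full; the proofs are below) =====
def Claim_equal_fisher_number : Prop := ∀ (number : Int), Dom_fisher_number number → Spec_fisher_number number (fisher_number number)

-- ===== LEMMAS AND PROOFS =====

-- weight of a small divisor in the paired count
def pvW (n d : Nat) : Nat := if d * d = n then 1 else 2

-- A's loop over range(2, m+1) computes the product of the divisors of n that lie in [2, m]
lemma foldA_eq_prod (n : Nat) (m : Nat) :
    (PySem.List.pyRange 2 ((m : Int) + 1) 1).foldl
      (fun acc i => if PySem.Int.mod (n : Int) i == 0 then acc * i else acc) 1
      = ∏ d ∈ Finset.Ico 2 (m + 1), (if d ∣ n then (d : Int) else 1) := by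
  induction m with
  | zero => simp [PySem.List.pyRange_one_eq_nil]
  | succ m ih =>
    rcases Nat.lt_or_ge m 1 with hm | hm
    · interval_cases m
      simp [PySem.List.pyRange_one_eq_nil]
    · have h2 : (2 : Int) ≤ (m : Int) + 1 := by exact_mod_cast Nat.succ_le_succ hm
      have hcast : ((m + 1 : Nat) : Int) + 1 = ((m : Int) + 1) + 1 := by push_cast; ring
      rw [hcast, PySem.List.pyRange_one_succ_right h2, List.foldl_append, ih]
      have hIco : m + 1 + 1 = (m + 1) + 1 := rfl
      rw [Finset.prod_Ico_succ_top (by omega : 2 ≤ m + 1)]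
      simp only [List.foldl_cons, List.foldl_nil]
      by_cases hd : (m + 1) ∣ n
      · have hm0 : PySem.Int.mod (n : Int) ((m : Int) + 1) = 0 := by
          rw [PySem.Int.mod_eq_zero_iff_dvd]
          exact_mod_cast hd
        have hcond : (PySem.Int.mod (n : Int) ((m : Int) + 1) == 0) = true := by
          rw [beq_iff_eq]; exact hm0
        rw [hcond]
        rw [if_pos rfl, if_pos hd]
        push_cast
        ring
      · have hm0 : ¬ PySem.Int.mod (n : Int) ((m : Int) + 1) = 0 := by
          rw [PySem.Int.mod_eq_zero_iff_dvd]
          intro h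
          exact hd (by exact_mod_cast h)
        have hcond : (PySem.Int.mod (n : Int) ((m : Int) + 1) == 0) = false := by
          rw [beq_eq_false_iff_ne]; exact hm0
        rw [hcond]
        rw [if_neg (by simp), if_neg hd, mul_one]

-- that product over [2, n] is the product of ALL divisors of n (the divisor 1 contributes 1)
lemma prod_ite_eq_prod_divisors (n : Nat) (hn : 1 ≤ n) :
    (∏ d ∈ Finset.Ico 2 (n + 1), (if d ∣ n then (d : Int) else 1))
      = ((∏ d ∈ n.divisors, d : Nat) : Int) := by
  have h1 : Finset.Ico 1 (n + 1) = insert 1 (Finset.Ico 2 (n + 1)) := by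
    ext x
    simp [Finset.mem_Ico, Finset.mem_insert]
    omega
  have : (∏ d ∈ n.divisors, (d : Int))
      = ∏ d ∈ Finset.Ico 1 (n + 1), (if d ∣ n then (d : Int) else 1) := by
    rw [Nat.divisors, Finset.prod_filter]
  rw [Nat.cast_prod, this, h1, Finset.prod_insert (by simp)]
  simp

-- the square of the product of all divisors is n ^ (number of divisors)
lemma prod_divisors_sq (n : Nat) :
    (∏ d ∈ n.divisors, d) ^ 2 = n ^ n.divisors.card := by
  have h : ∏ d ∈ n.divisors, (n / d) = ∏ d ∈ n.divisors, d := by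
    simpa using Nat.prod_div_divisors n id
  calc (∏ d ∈ n.divisors, d) ^ 2
      = (∏ d ∈ n.divisors, d) * (∏ d ∈ n.divisors, (n / d)) := by rw [h]; ring
    _ = ∏ d ∈ n.divisors, (d * (n / d)) := by rw [← Finset.prod_mul_distrib]
    _ = ∏ _d ∈ n.divisors, n := by
        refine Finset.prod_congr rfl fun d hd => ?_
        exact Nat.mul_div_cancel' (Nat.dvd_of_mem_divisors hd)
    _ = n ^ n.divisors.card := Finset.prod_const n

-- B's loop sums the pair-weights of the remaining small divisors
lemma fisherLoop_eq (n : Nat) (hn : 1 ≤ n) :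
    ∀ i tau, fisherLoop n i tau
      = tau + ∑ d ∈ n.divisors.filter (fun d => i ≤ d ∧ d * d ≤ n), pvW n d := by
  intro i tau
  induction i, tau using fisherLoop.induct n with
  | case1 i tau h hdvd ih =>
    have hiS : n.divisors.filter (fun d => i ≤ d ∧ d * d ≤ n)
        = insert i (n.divisors.filter (fun d => i + 1 ≤ d ∧ d * d ≤ n)) := by
      ext d
      simp only [Finset.mem_filter, Finset.mem_insert, Nat.mem_divisors]
      constructor
      · rintro ⟨⟨hd, hn0⟩, hid, hsq⟩
        rcases Nat.eq_or_lt_of_le hid with h' | h'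
        · left; omega
        · right; exact ⟨⟨hd, hn0⟩, by omega, hsq⟩
      · rintro (rfl | ⟨⟨hd, hn0⟩, hid, hsq⟩)
        · exact ⟨⟨Nat.dvd_of_mod_eq_zero hdvd, by omega⟩, le_refl _, h⟩
        · exact ⟨⟨hd, hn0⟩, by omega, hsq⟩
    rw [fisherLoop, dif_pos h, if_pos hdvd]
    simp only [dite_eq_ite] at ih
    rw [ih, hiS, Finset.sum_insert (by simp)]
    unfold pvW
    ring
  | case2 i tau h hdvd ih =>
    have hiS : n.divisors.filter (fun d => i ≤ d ∧ d * d ≤ n)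
        = n.divisors.filter (fun d => i + 1 ≤ d ∧ d * d ≤ n) := by
      ext d
      simp only [Finset.mem_filter, Nat.mem_divisors]
      constructor
      · rintro ⟨⟨hd, hn0⟩, hid, hsq⟩
        refine ⟨⟨hd, hn0⟩, ?_, hsq⟩
        rcases Nat.eq_or_lt_of_le hid with heq | h'
        · exact absurd (by rw [heq]; exact Nat.mod_eq_zero_of_dvd hd) hdvd
        · omega
      · rintro ⟨⟨hd, hn0⟩, hid, hsq⟩
        exact ⟨⟨hd, hn0⟩, by omega, hsq⟩
    rw [fisherLoop, dif_pos h, if_neg hdvd, ih, hiS]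
  | case3 i tau h =>
    rw [fisherLoop, dif_neg h]
    have : n.divisors.filter (fun d => i ≤ d ∧ d * d ≤ n) = ∅ := by
      ext d
      simp only [Finset.mem_filter, Finset.notMem_empty, iff_false, not_and]
      intro _ hid hsq
      exact h (le_trans (Nat.mul_le_mul hid hid) hsq)
    simp [this]

-- the paired count over small divisors equals the total number of divisors
lemma sum_pvW_eq_card (n : Nat) (hn : 1 ≤ n) :
    (∑ d ∈ n.divisors.filter (fun d => d * d ≤ n), pvW n d) = n.divisors.card := by
  have hn0 : n ≠ 0 := by omega
  have hsplit :
      (n.divisors.filter (fun d => d * d ≤ n)).card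
        + (n.divisors.filter (fun d => ¬ d * d ≤ n)).card = n.divisors.card :=
    Finset.card_filter_add_card_filter_not (s := n.divisors) (fun d => d * d ≤ n)
  have hbij :
      (n.divisors.filter (fun d => ¬ d * d ≤ n)).card
        = ((n.divisors.filter (fun d => d * d ≤ n)).filter (fun d => ¬ d * d = n)).card := by
    apply Finset.card_bij' (fun d _ => n / d) (fun d _ => n / d)
    · intro a ha
      simp only [Finset.mem_filter, Nat.mem_divisors] at ha ⊢
      obtain ⟨⟨hdvd, -⟩, hbig⟩ := ha
      have ha0 : 0 < a := by
        rcases Nat.eq_zero_or_pos a with rfl | h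
        · exact absurd (Nat.eq_zero_of_zero_dvd hdvd) hn0
        · exact h
      have hqa : n / a * a = n := Nat.div_mul_cancel hdvd
      have hq1 : 1 ≤ n / a := by
        rcases Nat.eq_zero_or_pos (n / a) with h0 | h1
        · rw [h0, zero_mul] at hqa; omega
        · exact h1
      have hqlt : n / a < a := by nlinarith
      have hlt : n / a * (n / a) < n := by nlinarith
      exact ⟨⟨⟨⟨a, by omega⟩, hn0⟩, by omega⟩, by omega⟩
    · intro b hb
      simp only [Finset.mem_filter, Nat.mem_divisors] at hb ⊢
      obtain ⟨⟨⟨hdvd, -⟩, hle⟩, hne⟩ := hb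
      have hb0 : 0 < b := by
        rcases Nat.eq_zero_or_pos b with rfl | h
        · exact absurd (Nat.eq_zero_of_zero_dvd hdvd) hn0
        · exact h
      have hqb : n / b * b = n := Nat.div_mul_cancel hdvd
      have hlt : b * b < n := by omega
      have hqgt : b < n / b := by nlinarith
      have : n < n / b * (n / b) := by nlinarith
      exact ⟨⟨⟨b, by omega⟩, hn0⟩, by omega⟩
    · intro a ha
      simp only [Finset.mem_filter, Nat.mem_divisors] at ha
      exact Nat.div_div_self ha.1.1 hn0
    · intro b hb
      simp only [Finset.mem_filter, Nat.mem_divisors] at hb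
      exact Nat.div_div_self hb.1.1.1 hn0
  have hw : ∀ d ∈ n.divisors.filter (fun d => d * d ≤ n),
      pvW n d = 1 + (if ¬ d * d = n then 1 else 0) := by
    intro d _
    unfold pvW
    by_cases h : d * d = n <;> simp [h]
  rw [Finset.sum_congr rfl hw, Finset.sum_add_distrib, Finset.sum_const, smul_eq_mul,
    mul_one, ← Finset.card_filter]
  omega

-- main arithmetic equivalence for n ≥ 2
lemma key (n : Nat) (hn : 2 ≤ n) :
    ((n : Int) ^ 3 = ((∏ d ∈ n.divisors, d : Nat) : Int)) ↔ n.divisors.card = 6 := by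
  have hcast : ((n : Int) ^ 3 = ((∏ d ∈ n.divisors, d : Nat) : Int))
      ↔ n ^ 3 = ∏ d ∈ n.divisors, d := by
    rw [show ((n : Int)) ^ 3 = ((n ^ 3 : Nat) : Int) by push_cast; ring]
    exact Nat.cast_inj
  rw [hcast]
  constructor
  · intro h
    have h2 : n ^ 6 = n ^ n.divisors.card := by
      have := prod_divisors_sq n
      rw [← h] at this
      calc n ^ 6 = (n ^ 3) ^ 2 := by ring
        _ = n ^ n.divisors.card := this
    exact (Nat.pow_right_injective hn h2.symm)
  · intro h
    have h2 : (∏ d ∈ n.divisors, d) ^ 2 = (n ^ 3) ^ 2 := by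
      rw [prod_divisors_sq, h]; ring
    exact (Nat.pow_left_injective (by omega) h2).symm

-- ===== VERDICT (by name: the statement is the Claim_ definition above) =====
theorem fisher_number_spec : Claim_equal_fisher_number := by
  intro number _
  unfold Spec_fisher_number fisher_number fisher_number_alt
  by_cases h1 : number ≤ 1
  · have : PySem.List.pyRange 2 (number + 1) 1 = [] :=
      PySem.List.pyRange_one_eq_nil (by omega)
    rw [this]
    simp only [List.foldl_nil]
    by_cases h0 : number ≤ 0
    · have hne : number ^ 3 ≠ 1 := by nlinarith [sq_nonneg number]
      simp [h0, hne]
    · have heq : number = 1 := by omega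
      subst heq
      norm_num
  · -- number ≥ 2
    have h0 : ¬ number ≤ 0 := by omega
    have hne1 : number ≠ 1 := by omega
    rw [if_neg h0, if_neg hne1]
    set n : Nat := number.toNat with hn
    have hnn : (n : Int) = number := Int.toNat_of_nonneg (by omega)
    have hn2 : 2 ≤ n := by omega
    rw [← hnn, foldA_eq_prod n n, prod_ite_eq_prod_divisors n (by omega)]
    have hkey := key n hn2
    have hloop := fisherLoop_eq n (by omega) 1 0
    have hfil : n.divisors.filter (fun d => 1 ≤ d ∧ d * d ≤ n)
        = n.divisors.filter (fun d => d * d ≤ n) := by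
      apply Finset.filter_congr
      intro d hd
      have : 1 ≤ d := Nat.pos_of_mem_divisors hd
      simp [this]
    rw [hfil, sum_pvW_eq_card n (by omega)] at hloop
    simp only [Nat.zero_add] at hloop
    by_cases hc : (n : Int) ^ 3 = ((∏ d ∈ n.divisors, d : Nat) : Int)
    · rw [if_pos hc]
      have : n.divisors.card = 6 := hkey.mp hc
      simp [hloop, this]
    · rw [if_neg hc]
      have : ¬ n.divisors.card = 6 := fun hh => hc (hkey.mpr hh)
      simp [hloop, this]
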